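-- pv_equiv track=rewrite | github.com/aliceyuhehu/3dprinteros-1 | flask-app/printing_helpers.py | printer_rows
-- ===== SOURCE A (Python) =====
-- import string, json, pdb
--
-- def printer_rows(printers):
--   rows = []
--   alphabet = list(string.ascii_lowercase)
--   for letter in alphabet:
--       row = [x for x in printers if x['letter'].lower() == letter] #get all printers with same letter(which means row) and put in a list together
--       if row:
--           rows.append(row)
--   return rows
-- ===== SOURCE B (Python) =====
-- import string
--
-- def printer_rows(printers):
--     groups = {}
--     for x in printers:
--         groups.setdefault(x['letter'].lower(), []).append(x)
--     rows = []
--     for letter in string.ascii_lowercase: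
--         g = groups.get(letter)
--         if g:
--             rows.append(g)
--     return rows
-- ===== Notes on version B (the rewrite author's own statement) =====
-- stated objective: idiomatic
-- what changed: Replace 26 full scans of printers (one filter per alphabet letter) by a single grouping pass into a dict keyed by the lowercased letter, then emit the groups in alphabet order.
import Mathlib
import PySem

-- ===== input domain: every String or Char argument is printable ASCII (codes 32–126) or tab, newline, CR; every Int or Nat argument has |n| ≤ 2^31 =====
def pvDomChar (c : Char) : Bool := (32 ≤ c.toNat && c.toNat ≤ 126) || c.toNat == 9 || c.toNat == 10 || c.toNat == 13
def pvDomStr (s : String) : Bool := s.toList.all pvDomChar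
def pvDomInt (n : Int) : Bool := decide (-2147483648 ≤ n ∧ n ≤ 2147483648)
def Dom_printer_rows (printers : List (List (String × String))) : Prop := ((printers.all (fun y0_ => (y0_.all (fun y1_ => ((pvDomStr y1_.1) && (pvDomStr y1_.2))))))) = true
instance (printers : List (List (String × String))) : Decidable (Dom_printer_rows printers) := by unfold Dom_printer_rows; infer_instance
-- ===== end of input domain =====

-- B groups printers by lowercased letter in one pass, then emits rows in alphabet order
-- (same return value by a different traversal: one grouping pass, then an alphabet-ordered emit).

-- string.ascii_lowercase as the list of its 1-character strings (shared module constant)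
def pvAlphabet : List String :=
  ["a","b","c","d","e","f","g","h","i","j","k","l","m",
   "n","o","p","q","r","s","t","u","v","w","x","y","z"]

-- x['letter'].lower(); the "" default is unreachable under Pre_ (key always present)
def pvKey (x : List (String × String)) : String :=
  PySem.Str.lower ((PySem.Dict.mk x).getD "letter" "")

-- ===== PORT A =====
def printer_rows (printers : List (List (String × String))) : List (List (List (String × String))) :=
  pvAlphabet.foldl
    (fun rows letter =>
      let row := printers.filter (fun x => pvKey x == letter)
      if row.isEmpty then rows else rows ++ [row])
    []

-- ===== PORT B =====
def printer_rows_alt (printers : List (List (String × String))) : List (List (List (String × String))) :=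
  let groups : PySem.Dict String (List (List (String × String))) :=
    printers.foldl (fun d x => d.modify (pvKey x) [] (fun g => g ++ [x])) PySem.Dict.empty
  pvAlphabet.foldl
    (fun rows letter =>
      match groups.get? letter with
      | some g => if g.isEmpty then rows else rows ++ [g]
      | none => rows)
    []

-- ===== PRECONDITION & SPEC =====
-- Pre_ excludes printers missing the 'letter' key, on which the Python A raises KeyError.
def Pre_printer_rows (printers : List (List (String × String))) : Prop :=
  (printers.all (fun x => (PySem.Dict.mk x).contains "letter")) = true
instance (printers : List (List (String × String))) : Decidable (Pre_printer_rows printers) := by unfold Pre_printer_rows; infer_instance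
def pvWitness_printer_rows : (List (List (String × String))) := [[("letter", "A"), ("name", "p1")]]
def Spec_printer_rows (printers : List (List (String × String))) (out : List (List (List (String × String)))) : Prop := out = printer_rows_alt printers
instance (printers : List (List (String × String))) (out : List (List (List (String × String)))) : Decidable (Spec_printer_rows printers out) := by unfold Spec_printer_rows; infer_instance

-- ===== CLAIM (what is proved, stated in full; the proofs are below) =====
def Claim_equal_printer_rows : Prop := ∀ (printers : List (List (String × String))), Dom_printer_rows printers → Pre_printer_rows printers → Spec_printer_rows printers (printer_rows printers)

-- ===== LEMMAS AND PROOFS =====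

-- grouping invariant: each group is exactly A's filter for that letter
theorem pv_group_getD (l : List (List (String × String)))
    (d : PySem.Dict String (List (List (String × String)))) (letter : String) :
    (l.foldl (fun d x => d.modify (pvKey x) [] (fun g => g ++ [x])) d).getD letter []
      = d.getD letter [] ++ l.filter (fun x => pvKey x == letter) := by
  induction l generalizing d with
  | nil => simp
  | cons x xs ih =>
    simp only [List.foldl_cons, List.filter_cons, ih]
    rw [PySem.Dict.getD_modify]
    by_cases h : letter = pvKey x
    · simp [h, List.append_assoc]
    · have : (pvKey x == letter) = false := by
        simp; exact fun e => h e.symm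
      simp [h, this]

theorem printer_rows_eq (printers : List (List (String × String))) :
    printer_rows printers = printer_rows_alt printers := by
  unfold printer_rows printer_rows_alt
  have hfun : ∀ (rows : List (List (List (String × String)))) (letter : String),
      (match (printers.foldl (fun d x => d.modify (pvKey x) [] (fun g => g ++ [x]))
               PySem.Dict.empty).get? letter with
       | some g => if g.isEmpty then rows else rows ++ [g]
       | none => rows)
      = (let row := printers.filter (fun x => pvKey x == letter)
         if row.isEmpty then rows else rows ++ [row]) := by
    intro rows letter
    have hD := pv_group_getD printers PySem.Dict.empty letter
    rw [PySem.Dict.getD_empty, List.nil_append] at hD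
    rw [PySem.Dict.getD_eq_get?_getD] at hD
    cases hg : (printers.foldl (fun d x => d.modify (pvKey x) [] (fun g => g ++ [x]))
        PySem.Dict.empty).get? letter with
    | none =>
      rw [hg] at hD
      simp only [Option.getD_none] at hD
      simp [← hD]
    | some g =>
      rw [hg] at hD
      simp only [Option.getD_some] at hD
      simp [hD]
  have hstep :
      (fun (rows : List (List (List (String × String)))) (letter : String) =>
        match (printers.foldl (fun d x => d.modify (pvKey x) [] (fun g => g ++ [x]))
                 PySem.Dict.empty).get? letter with
        | some g => if g.isEmpty then rows else rows ++ [g]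
        | none => rows)
      = (fun rows letter =>
          let row := printers.filter (fun x => pvKey x == letter)
          if row.isEmpty then rows else rows ++ [row]) := by
    funext rows letter; exact hfun rows letter
  simp only [hstep]

-- ===== VERDICT (by name: the statement is the Claim_ definition above) =====
theorem printer_rows_spec : Claim_equal_printer_rows := by
  intro printers _ _
  unfold Spec_printer_rows
  exact printer_rows_eq printers
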